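-- pv_equiv track=rewrite | github.com/ACquantclub/Amherst-College-Quant-Club-Resources | Interview-Prep/ML_and_Python_Cheatsheets/sample_coding_interview_questions_solved.py | words_with_consecutive_letters
-- ===== SOURCE A (Python) =====
-- def words_with_consecutive_letters(word_list):
--     result = []
--
--     for word in word_list:
--         for i in range(len(word) - 2):
--             if ord(word[i]) == ord(word[i+1]) - 1 == ord(word[i+2]) - 2:
--                 result.append(word)
--                 break
--
--     return result
-- ===== SOURCE B (Python) =====
-- def words_with_consecutive_letters(word_list):
--     result = []
--     for word in word_list:
--         run = 1
--         for prev, cur in zip(word, word[1:]):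
--             run = run + 1 if ord(cur) == ord(prev) + 1 else 1
--             if run >= 3:
--                 result.append(word)
--                 break
--     return result
-- ===== Notes on version B (the rewrite author's own statement) =====
-- stated objective: alternative
-- what changed: Replaced the fixed-window indexed triple test over range(len(word)-2) with a stateful single scan over adjacent character pairs that maintains an ascending-run counter and appends once the run reaches 3.
import Mathlib
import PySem

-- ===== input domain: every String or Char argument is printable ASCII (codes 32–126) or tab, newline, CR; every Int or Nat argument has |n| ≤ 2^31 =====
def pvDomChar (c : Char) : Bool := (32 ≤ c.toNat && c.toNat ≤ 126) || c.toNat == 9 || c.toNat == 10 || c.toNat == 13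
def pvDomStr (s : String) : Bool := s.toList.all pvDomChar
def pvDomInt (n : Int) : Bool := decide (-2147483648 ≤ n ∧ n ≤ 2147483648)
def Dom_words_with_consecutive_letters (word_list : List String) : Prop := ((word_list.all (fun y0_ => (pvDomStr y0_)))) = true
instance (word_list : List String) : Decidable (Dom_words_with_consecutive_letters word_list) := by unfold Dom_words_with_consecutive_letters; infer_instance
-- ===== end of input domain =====

-- B replaces A's fixed-window indexed triple test with a single scan over adjacent
-- character pairs maintaining an ascending-run counter (alternative decomposition).

-- ===== PORT A =====
-- A's chained comparison at index i (indices produced by range(len(word)-2) are always in range,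
-- so getD's default is never used).
def pvTripAt (cs : List Char) (i : Nat) : Bool :=
  ((cs.getD i ' ').toNat : Int) == ((cs.getD (i+1) ' ').toNat : Int) - 1
    && (((cs.getD (i+1) ' ').toNat : Int) - 1 == ((cs.getD (i+2) ' ').toNat : Int) - 2)

-- A's inner 'for i in range(...)' with break: returns whether the word is appended.
def pvFindTriple (cs : List Char) : List Nat → Bool
  | [] => false
  | i :: rest => if pvTripAt cs i then true else pvFindTriple cs rest

def words_with_consecutive_letters (word_list : List String) : List String :=
  word_list.foldl (fun result word =>
    if pvFindTriple word.toList (List.range (word.toList.length - 2)) then result ++ [word]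
    else result) []

-- ===== PORT B =====
-- B's inner 'for prev, cur in zip(word, word[1:])' with run counter and break.
def pvRunLoop (run : Nat) (prev : Char) : List Char → Bool
  | [] => false
  | cur :: rest =>
      let run' := if cur.toNat == prev.toNat + 1 then run + 1 else 1
      if 3 ≤ run' then true else pvRunLoop run' cur rest

def words_with_consecutive_letters_alt (word_list : List String) : List String :=
  word_list.foldl (fun result word =>
    match word.toList with
    | [] => result
    | c :: rest => if pvRunLoop 1 c rest then result ++ [word] else result) []

-- ===== PRECONDITION & SPEC =====
def Spec_words_with_consecutive_letters (word_list : List String) (out : List String) : Prop := out = words_with_consecutive_letters_alt word_list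
instance (word_list : List String) (out : List String) : Decidable (Spec_words_with_consecutive_letters word_list out) := by unfold Spec_words_with_consecutive_letters; infer_instance

-- ===== CLAIM (what is proved, stated in full; the proofs are below) =====
def Claim_equal_words_with_consecutive_letters : Prop := ∀ (word_list : List String), Dom_words_with_consecutive_letters word_list → Spec_words_with_consecutive_letters word_list (words_with_consecutive_letters word_list)

-- ===== LEMMAS AND PROOFS =====

-- structural "has an ascending triple" predicate used as the bridge between the two ports
def pvHasTriple : List Char → Bool
  | a :: b :: c :: rest =>
      (b.toNat == a.toNat + 1 && c.toNat == b.toNat + 1) || pvHasTriple (b :: c :: rest)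
  | _ => false

theorem pvFindTriple_eq_any (cs : List Char) (l : List Nat) :
    pvFindTriple cs l = l.any (pvTripAt cs) := by
  induction l with
  | nil => rfl
  | cons i rest ih => by_cases h : pvTripAt cs i = true <;> simp [pvFindTriple, h, ih]

theorem pvTripAt_cons (a : Char) (cs : List Char) (i : Nat) :
    pvTripAt (a :: cs) (i+1) = pvTripAt cs i := by
  simp [pvTripAt]

theorem pvHasTriple_iff (cs : List Char) :
    pvHasTriple cs = true ↔ ∃ i, i < cs.length - 2 ∧ pvTripAt cs i = true := by
  induction cs with
  | nil => simp [pvHasTriple]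
  | cons a t ih =>
    cases t with
    | nil => simp [pvHasTriple]
    | cons b u =>
      cases u with
      | nil => simp [pvHasTriple]
      | cons c v =>
        simp only [pvHasTriple, Bool.or_eq_true, ih]
        constructor
        · rintro (h | ⟨i, hi, ht⟩)
          · refine ⟨0, by simp, ?_⟩
            simp only [pvTripAt, List.getD_cons_zero, List.getD_cons_succ, beq_iff_eq,
              Bool.and_eq_true] at h ⊢
            omega
          · refine ⟨i+1, ?_, by rwa [pvTripAt_cons]⟩
            simp only [List.length_cons] at hi ⊢
            omega
        · rintro ⟨i, hi, ht⟩
          cases i with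
          | zero =>
            left
            simp only [pvTripAt, List.getD_cons_zero, List.getD_cons_succ, beq_iff_eq,
              Bool.and_eq_true] at ht ⊢
            omega
          | succ j =>
            right
            refine ⟨j, ?_, by rwa [pvTripAt_cons] at ht⟩
            simp only [List.length_cons] at hi ⊢
            omega

-- one-step unfolding of the scan loop
theorem pvRunLoop_cons (run : Nat) (prev cur : Char) (rest : List Char) :
    pvRunLoop run prev (cur :: rest) =
      (let run' := if cur.toNat == prev.toNat + 1 then run + 1 else 1;
       if 3 ≤ run' then true else pvRunLoop run' cur rest) := rfl

theorem pvRunLoop_one (a c : Char) (rest : List Char) :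
    pvRunLoop 1 a (c :: rest) = pvRunLoop (if c.toNat == a.toNat + 1 then 2 else 1) c rest := by
  by_cases h : c.toNat == a.toNat + 1 <;> simp [pvRunLoop_cons, h]

theorem pvRunLoop_two (a c : Char) (rest : List Char) :
    pvRunLoop 2 a (c :: rest) = (if c.toNat == a.toNat + 1 then true else pvRunLoop 1 c rest) := by
  by_cases h : c.toNat == a.toNat + 1 <;> simp [pvRunLoop_cons, h]

-- characterization of the run-counter scan, for the two run values it is called with
theorem pvRunLoop_char (l : List Char) : ∀ a : Char,
    (pvRunLoop 1 a l = pvHasTriple (a :: l)) ∧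
    (pvRunLoop 2 a l =
      ((match l with | [] => false | d :: _ => d.toNat == a.toNat + 1) || pvHasTriple (a :: l))) := by
  induction l with
  | nil => intro a; simp [pvRunLoop, pvHasTriple]
  | cons c rest ih =>
    intro a
    constructor
    · rw [pvRunLoop_one]
      by_cases h : c.toNat == a.toNat + 1
      · rw [if_pos h, (ih c).2]
        cases rest with
        | nil => simp [pvHasTriple]
        | cons d v => simp [pvHasTriple, h]
      · rw [if_neg h, (ih c).1]
        cases rest with
        | nil => simp [pvHasTriple]
        | cons d v => simp [pvHasTriple, h]
    · rw [pvRunLoop_two]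
      by_cases h : c.toNat == a.toNat + 1
      · simp [h]
      · rw [if_neg h, (ih c).1]
        cases rest with
        | nil => simp [pvHasTriple]; simpa using h
        | cons d v => simp [pvHasTriple, h]

-- the per-word decisions of the two ports coincide
theorem pvDecision_eq (cs : List Char) :
    pvFindTriple cs (List.range (cs.length - 2)) =
      (match cs with | [] => false | c :: rest => pvRunLoop 1 c rest) := by
  cases cs with
  | nil => rfl
  | cons c rest =>
    show pvFindTriple (c :: rest) (List.range ((c :: rest).length - 2)) = pvRunLoop 1 c rest
    rw [(pvRunLoop_char rest c).1, pvFindTriple_eq_any]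
    apply Bool.eq_iff_iff.2
    rw [pvHasTriple_iff]
    simp only [List.any_eq_true, List.mem_range]

-- ===== VERDICT (by name: the statement is the Claim_ definition above) =====
theorem words_with_consecutive_letters_spec : Claim_equal_words_with_consecutive_letters := by
  intro word_list _
  unfold Spec_words_with_consecutive_letters
  unfold words_with_consecutive_letters words_with_consecutive_letters_alt
  congr 1
  funext result word
  rw [pvDecision_eq]
  cases h : word.toList <;> simp
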